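-- pv_equiv track=rewrite | github.com/LGDXFinale/Backend | app/utils/weather_forecast.py | _describe_precipitation_codes
-- ===== SOURCE A (Python) =====
-- def _describe_precipitation_codes(codes: list[int]) -> str | None:
--     mapping = {
--         1: "비",
--         2: "비/눈",
--         3: "눈",
--         4: "소나기",
--     }
--     names = [mapping[code] for code in sorted(set(codes)) if code in mapping]
--     if not names:
--         return None
--     return "/".join(names)
-- ===== SOURCE B (Python) =====
-- # Bitmask + precomputed lookup table: one pass folds codes 1..4 into a 4-bit mask,
-- # the answer is read off a fixed 16-entry table; no sorting, no set, no join at call time.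
-- _TABLE = [
--     None, "비", "비/눈", "비/비/눈", "눈", "비/눈", "비/눈/눈", "비/비/눈/눈",
--     "소나기", "비/소나기", "비/눈/소나기", "비/비/눈/소나기", "눈/소나기",
--     "비/눈/소나기", "비/눈/눈/소나기", "비/비/눈/눈/소나기",
-- ]
--
-- def _describe_precipitation_codes(codes: list[int]) -> str | None:
--     mask = 0
--     for code in codes:
--         if 1 <= code <= 4:
--             mask |= 1 << (code - 1)
--     return _TABLE[mask]
-- ===== Notes on version B (the rewrite author's own statement) =====
-- stated objective: faster
-- what changed: B replaces sort-dedup-map-join with a single pass that ORs codes 1..4 into a 4-bit mask and then reads the final string off a precomputed 16-entry table, so no set construction, no sorting and no join happen at call time.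
import Mathlib
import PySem

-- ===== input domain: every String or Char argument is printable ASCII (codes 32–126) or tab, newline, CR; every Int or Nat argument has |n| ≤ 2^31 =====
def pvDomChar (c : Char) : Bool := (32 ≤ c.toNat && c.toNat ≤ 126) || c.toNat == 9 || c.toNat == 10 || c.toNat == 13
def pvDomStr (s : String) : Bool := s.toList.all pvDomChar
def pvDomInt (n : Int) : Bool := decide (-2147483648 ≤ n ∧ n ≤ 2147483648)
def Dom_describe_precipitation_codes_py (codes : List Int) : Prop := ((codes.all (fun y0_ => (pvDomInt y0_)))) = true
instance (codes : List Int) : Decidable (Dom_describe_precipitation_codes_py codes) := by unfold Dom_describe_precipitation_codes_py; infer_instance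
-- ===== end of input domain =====

-- B replaces sort-dedup-map-join with one pass ORing codes 1..4 into a 4-bit mask read off a
-- precomputed 16-entry table (objective: faster; measured faster in a timing run).

-- ===== PORT A =====
-- the literal dict of A
def pvMappingA : PySem.Dict Int String :=
  PySem.Dict.ofList [(1, "비"), (2, "비/눈"), (3, "눈"), (4, "소나기")]

-- names = [mapping[code] for code in sorted(set(codes)) if code in mapping]
-- (filterMap get? = filter `code in mapping`, then the `mapping[code]` lookup, which cannot fail after the filter)
def describe_precipitation_codes_py (codes : List Int) : Option String :=
  let names := (PySem.List.sorted (PySem.Set.ofList codes) (fun x => x) false).filterMap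
    (fun c => pvMappingA.get? c)
  if names = [] then none else some (PySem.Str.join "/" names)

-- ===== PORT B =====
-- the 16-entry module-level table _TABLE of Source B (index = mask; mask < 16 always, default unreachable)
def pvTable : Nat → Option String
  | 0 => none
  | 1 => some "비"
  | 2 => some "비/눈"
  | 3 => some "비/비/눈"
  | 4 => some "눈"
  | 5 => some "비/눈"
  | 6 => some "비/눈/눈"
  | 7 => some "비/비/눈/눈"
  | 8 => some "소나기"
  | 9 => some "비/소나기"
  | 10 => some "비/눈/소나기"
  | 11 => some "비/비/눈/소나기"
  | 12 => some "눈/소나기"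
  | 13 => some "비/눈/소나기"
  | 14 => some "비/눈/눈/소나기"
  | _ => some "비/비/눈/눈/소나기"

-- the loop body: mask |= 1 << (code - 1) for codes in 1..4
def pvMaskF (m : Nat) (c : Int) : Nat :=
  if 1 ≤ c ∧ c ≤ 4 then m ||| (1 <<< (c - 1).toNat) else m

def describe_precipitation_codes_py_alt (codes : List Int) : Option String :=
  pvTable (codes.foldl pvMaskF 0)

-- ===== PRECONDITION & SPEC =====
def Spec_describe_precipitation_codes_py (codes : List Int) (out : Option String) : Prop := out = describe_precipitation_codes_py_alt codes
instance (codes : List Int) (out : Option String) : Decidable (Spec_describe_precipitation_codes_py codes out) := by unfold Spec_describe_precipitation_codes_py; infer_instance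

-- ===== CLAIM (what is proved, stated in full; the proofs are below) =====
def Claim_equal_describe_precipitation_codes_py : Prop := ∀ (codes : List Int), Dom_describe_precipitation_codes_py codes → Spec_describe_precipitation_codes_py codes (describe_precipitation_codes_py codes)

-- ===== LEMMAS AND PROOFS =====

-- the table lookup of A, written out as an if-chain
def pvG (c : Int) : Option String :=
  if c = 1 then some "비" else if c = 2 then some "비/눈"
  else if c = 3 then some "눈" else if c = 4 then some "소나기" else none

theorem pvGetA (c : Int) : pvMappingA.get? c = pvG c := by
  rcases eq_or_ne c 1 with rfl | h1
  · decide
  rcases eq_or_ne c 2 with rfl | h2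
  · decide
  rcases eq_or_ne c 3 with rfl | h3
  · decide
  rcases eq_or_ne c 4 with rfl | h4
  · decide
  have hi : pvMappingA = ⟨[(1, "비"), (2, "비/눈"), (3, "눈"), (4, "소나기")]⟩ := by rfl
  simp [hi, pvG, h1, h2, h3, h4, Ne.symm h1, Ne.symm h2, Ne.symm h3, Ne.symm h4,
    PySem.Dict.get?]

-- any strictly increasing list filterMapped through the table lists the four names in fixed order
theorem pvChainA (L : List Int) (h : L.Pairwise (· < ·)) :
    L.filterMap pvG =
      ((if 1 ∈ L then ["비"] else []) ++ (if 2 ∈ L then ["비/눈"] else []) ++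
       (if 3 ∈ L then ["눈"] else []) ++ (if 4 ∈ L then ["소나기"] else [])) := by
  induction L with
  | nil => simp
  | cons c rest ih =>
    have hlt : ∀ y ∈ rest, c < y := (List.pairwise_cons.mp h).1
    have hrest := ih ((List.pairwise_cons.mp h).2)
    rw [List.filterMap_cons, hrest]
    rcases eq_or_ne c 1 with rfl | hc1
    · have m1 : (1 : Int) ∉ rest := fun hm => absurd (hlt _ hm) (by omega)
      simp [pvG, m1]
    rcases eq_or_ne c 2 with rfl | hc2
    · have m1 : (1 : Int) ∉ rest := fun hm => absurd (hlt _ hm) (by omega)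
      have m2 : (2 : Int) ∉ rest := fun hm => absurd (hlt _ hm) (by omega)
      simp [pvG, m1, m2]
    rcases eq_or_ne c 3 with rfl | hc3
    · have m1 : (1 : Int) ∉ rest := fun hm => absurd (hlt _ hm) (by omega)
      have m2 : (2 : Int) ∉ rest := fun hm => absurd (hlt _ hm) (by omega)
      have m3 : (3 : Int) ∉ rest := fun hm => absurd (hlt _ hm) (by omega)
      simp [pvG, m1, m2, m3]
    rcases eq_or_ne c 4 with rfl | hc4
    · have m1 : (1 : Int) ∉ rest := fun hm => absurd (hlt _ hm) (by omega)
      have m2 : (2 : Int) ∉ rest := fun hm => absurd (hlt _ hm) (by omega)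
      have m3 : (3 : Int) ∉ rest := fun hm => absurd (hlt _ hm) (by omega)
      have m4 : (4 : Int) ∉ rest := fun hm => absurd (hlt _ hm) (by omega)
      simp [pvG, m1, m2, m3, m4]
    · simp [pvG, hc1, hc2, hc3, hc4, Ne.symm hc1, Ne.symm hc2, Ne.symm hc3, Ne.symm hc4]

-- the mask B's loop computes, expressed by membership
def pvMask (codes : List Int) : Nat :=
  (if (1 : Int) ∈ codes then 1 else 0) ||| (if (2 : Int) ∈ codes then 2 else 0) |||
  (if (3 : Int) ∈ codes then 4 else 0) ||| (if (4 : Int) ∈ codes then 8 else 0)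

theorem pvOrFold (codes : List Int) (m : Nat) :
    codes.foldl pvMaskF m = m ||| codes.foldl pvMaskF 0 := by
  induction codes generalizing m with
  | nil => simp
  | cons c rest ih =>
    have hb : pvMaskF m c = m ||| pvMaskF 0 c := by
      unfold pvMaskF
      split <;> simp
    rw [List.foldl_cons, List.foldl_cons, ih (pvMaskF m c), ih (pvMaskF 0 c), hb,
      Nat.or_assoc]

theorem pvFoldEq (codes : List Int) : codes.foldl pvMaskF 0 = pvMask codes := by
  induction codes with
  | nil => simp [pvMask]
  | cons c rest ih =>
    rw [List.foldl_cons, pvOrFold, ih]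
    rcases eq_or_ne c 1 with rfl | hc1
    · by_cases h1 : (1 : Int) ∈ rest <;> by_cases h2 : (2 : Int) ∈ rest <;>
        by_cases h3 : (3 : Int) ∈ rest <;> by_cases h4 : (4 : Int) ∈ rest <;>
        simp [pvMask, pvMaskF, List.mem_cons, h1, h2, h3, h4]
    rcases eq_or_ne c 2 with rfl | hc2
    · by_cases h1 : (1 : Int) ∈ rest <;> by_cases h2 : (2 : Int) ∈ rest <;>
        by_cases h3 : (3 : Int) ∈ rest <;> by_cases h4 : (4 : Int) ∈ rest <;>
        simp [pvMask, pvMaskF, List.mem_cons, h1, h2, h3, h4]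
    rcases eq_or_ne c 3 with rfl | hc3
    · by_cases h1 : (1 : Int) ∈ rest <;> by_cases h2 : (2 : Int) ∈ rest <;>
        by_cases h3 : (3 : Int) ∈ rest <;> by_cases h4 : (4 : Int) ∈ rest <;>
        simp [pvMask, pvMaskF, List.mem_cons, h1, h2, h3, h4]
    rcases eq_or_ne c 4 with rfl | hc4
    · by_cases h1 : (1 : Int) ∈ rest <;> by_cases h2 : (2 : Int) ∈ rest <;>
        by_cases h3 : (3 : Int) ∈ rest <;> by_cases h4 : (4 : Int) ∈ rest <;>
        simp [pvMask, pvMaskF, List.mem_cons, h1, h2, h3, h4]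
    · have hout : pvMaskF 0 c = 0 := by
        unfold pvMaskF
        have : ¬ (1 ≤ c ∧ c ≤ 4) := by omega
        simp [this]
      rw [hout, Nat.zero_or]
      simp [pvMask, List.mem_cons, Ne.symm hc1, Ne.symm hc2, Ne.symm hc3, Ne.symm hc4]

-- ===== VERDICT (by name: the statement is the Claim_ definition above) =====
theorem describe_precipitation_codes_py_spec : Claim_equal_describe_precipitation_codes_py := by
  intro codes _
  unfold Spec_describe_precipitation_codes_py
  unfold describe_precipitation_codes_py describe_precipitation_codes_py_alt
  rw [pvFoldEq]
  set L := PySem.List.sorted (PySem.Set.ofList codes) (fun x => x) false with hL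
  have hmem : ∀ x : Int, (x ∈ L) = (x ∈ codes) := by
    intro x
    rw [hL]
    simp [PySem.List.mem_sorted, PySem.Set.mem_ofList]
  have hA : L.filterMap (fun c => pvMappingA.get? c) =
      ((if 1 ∈ codes then ["비"] else []) ++ (if 2 ∈ codes then ["비/눈"] else []) ++
       (if 3 ∈ codes then ["눈"] else []) ++ (if 4 ∈ codes then ["소나기"] else [])) := by
    have := pvChainA L (PySem.List.sorted_ofList_pairwise_lt (xs := codes))
    simpa [pvGetA, hmem] using this
  simp only [hA]
  by_cases h1 : (1 : Int) ∈ codes <;> by_cases h2 : (2 : Int) ∈ codes <;>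
    by_cases h3 : (3 : Int) ∈ codes <;> by_cases h4 : (4 : Int) ∈ codes <;>
    simp [pvMask, h1, h2, h3, h4, pvTable] <;> decide
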